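-- pv_equiv track=rewrite | github.com/jrobertson627/adventofcode | year_2022/day5/day5_2022.py | move_multiple_crates
-- ===== SOURCE A (Python) =====
-- def move_multiple_crates(curr_cargo, num_moved, origin_stack, new_stack):
--     '''
--     Using the provided arguments, move the crates all at once to their
--     new location
--
--     Args:
--         curr_cargo(List of list of str): The current stack configuration
--         num_moved(int): How many boxes to move
--         origin_stack(int): The corresponding row-1 in curr_cargo to
--             move the boxes from
--         new_stack(int): The corresponding row-1 in curr_cargo to set the boxes
--     Returns:
--         curr_cargo(List of list of str): The new stack configuration
--     '''
--     crate_stack = []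
--     for _ in range(num_moved):
--         curr_crate = curr_cargo[origin_stack-1].pop(-1)
--         crate_stack.append(curr_crate)
--     for _ in range(len(crate_stack)):
--         crate = crate_stack.pop(-1)
--         curr_cargo[new_stack-1].append(crate)
--     return curr_cargo
-- ===== SOURCE B (Python) =====
-- def move_multiple_crates(curr_cargo, num_moved, origin_stack, new_stack):
--     '''Move num_moved crates from origin_stack to new_stack preserving order.'''
--     if num_moved > 0:
--         moved = curr_cargo[origin_stack-1][-num_moved:]
--         del curr_cargo[origin_stack-1][-num_moved:]
--         curr_cargo[new_stack-1].extend(moved)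
--     return curr_cargo
-- ===== Notes on version B (the rewrite author's own statement) =====
-- stated objective: simpler
-- what changed: Replaces A's two reversing pop-loops through a temporary buffer by one slice grab of the top num_moved crates, a slice deletion, and a single extend (guarding num_moved>0 so the -0 slice is never taken).
import Mathlib
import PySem

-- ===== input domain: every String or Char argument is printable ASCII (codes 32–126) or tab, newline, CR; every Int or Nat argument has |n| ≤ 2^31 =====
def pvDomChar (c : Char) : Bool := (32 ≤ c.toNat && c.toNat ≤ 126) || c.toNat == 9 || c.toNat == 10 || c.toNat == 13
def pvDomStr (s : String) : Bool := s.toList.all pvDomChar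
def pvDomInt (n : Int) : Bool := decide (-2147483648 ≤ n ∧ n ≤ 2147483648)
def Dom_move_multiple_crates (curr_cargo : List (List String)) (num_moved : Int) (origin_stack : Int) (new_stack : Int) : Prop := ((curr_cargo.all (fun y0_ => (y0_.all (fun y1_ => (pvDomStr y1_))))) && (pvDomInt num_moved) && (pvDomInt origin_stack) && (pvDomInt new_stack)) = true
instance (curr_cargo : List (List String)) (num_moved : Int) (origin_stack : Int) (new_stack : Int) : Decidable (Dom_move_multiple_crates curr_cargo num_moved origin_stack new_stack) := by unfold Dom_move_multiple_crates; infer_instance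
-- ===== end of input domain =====

-- B replaces A's two reversing pop-loops through a temporary buffer by one slice grab / slice delete / extend.
-- A mutates curr_cargo in place; the equivalence proved here is about the RETURN value only.

-- ===== PORT A =====
def move_multiple_crates (curr_cargo : List (List String)) (num_moved : Int) (origin_stack : Int) (new_stack : Int) : List (List String) :=
  -- first loop: for _ in range(num_moved): curr_crate = curr_cargo[origin_stack-1].pop(-1); crate_stack.append(curr_crate)
  let r1 := (PySem.List.pyRange 0 num_moved 1).foldl (fun (st : List (List String) × List String) _ =>
    match PySem.List.pyGet? st.1 (origin_stack - 1) with
    | none => st                      -- Python raises IndexError here (outside Pre_)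
    | some s =>
      match PySem.List.pop? s (-1) with
      | none => st                    -- Python raises IndexError here (outside Pre_)
      | some (c, s') => (PySem.List.pySetD st.1 (origin_stack - 1) s', st.2 ++ [c])) (curr_cargo, ([] : List String))
  -- second loop: for _ in range(len(crate_stack)): crate = crate_stack.pop(-1); curr_cargo[new_stack-1].append(crate)
  ((PySem.List.pyRange 0 (r1.2.length : Int) 1).foldl (fun (st : List (List String) × List String) _ =>
    match PySem.List.pop? st.2 (-1) with
    | none => st
    | some (c, cs') =>
        (PySem.List.pySetD st.1 (new_stack - 1) (PySem.List.pyGetD st.1 (new_stack - 1) [] ++ [c]), cs')) r1).1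

-- ===== PORT B =====
def move_multiple_crates_alt (curr_cargo : List (List String)) (num_moved : Int) (origin_stack : Int) (new_stack : Int) : List (List String) :=
  if num_moved > 0 then
    let s := PySem.List.pyGetD curr_cargo (origin_stack - 1) []   -- curr_cargo[origin_stack-1]; IndexError outside Pre_
    let moved := PySem.List.slice s (some (-num_moved)) none       -- curr_cargo[origin_stack-1][-num_moved:]
    let kept := PySem.List.slice s none (some (-num_moved))        -- del …[-num_moved:] leaves …[:-num_moved]
    let c1 := PySem.List.pySetD curr_cargo (origin_stack - 1) kept
    PySem.List.pySetD c1 (new_stack - 1) (PySem.List.pyGetD c1 (new_stack - 1) [] ++ moved)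
  else curr_cargo

-- ===== PRECONDITION & SPEC =====
-- Pre_ excludes exactly the inputs on which A raises IndexError: a positive num_moved with an
-- out-of-range stack index, or more crates requested than the origin stack holds.
def Pre_move_multiple_crates (curr_cargo : List (List String)) (num_moved : Int) (origin_stack : Int) (new_stack : Int) : Prop :=
  num_moved ≤ 0 ∨
    (PySem.Raise.InRange curr_cargo.length (origin_stack - 1) ∧
     PySem.Raise.InRange curr_cargo.length (new_stack - 1) ∧
     num_moved ≤ ((PySem.List.pyGetD curr_cargo (origin_stack - 1) []).length : Int))
instance (curr_cargo : List (List String)) (num_moved : Int) (origin_stack : Int) (new_stack : Int) : Decidable (Pre_move_multiple_crates curr_cargo num_moved origin_stack new_stack) := by unfold Pre_move_multiple_crates; infer_instance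

def pvWitness_move_multiple_crates : List (List String) × Int × Int × Int := ([["a", "b"], ["c"]], 1, 1, 2)

def Spec_move_multiple_crates (curr_cargo : List (List String)) (num_moved : Int) (origin_stack : Int) (new_stack : Int) (out : List (List String)) : Prop := out = move_multiple_crates_alt curr_cargo num_moved origin_stack new_stack
instance (curr_cargo : List (List String)) (num_moved : Int) (origin_stack : Int) (new_stack : Int) (out : List (List String)) : Decidable (Spec_move_multiple_crates curr_cargo num_moved origin_stack new_stack out) := by unfold Spec_move_multiple_crates; infer_instance

-- ===== CLAIM (what is proved, stated in full; the proofs are below) =====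
def Claim_equal_move_multiple_crates : Prop := ∀ (curr_cargo : List (List String)) (num_moved : Int) (origin_stack : Int) (new_stack : Int), Dom_move_multiple_crates curr_cargo num_moved origin_stack new_stack → Pre_move_multiple_crates curr_cargo num_moved origin_stack new_stack → Spec_move_multiple_crates curr_cargo num_moved origin_stack new_stack (move_multiple_crates curr_cargo num_moved origin_stack new_stack)

-- ===== LEMMAS AND PROOFS =====

theorem foldl_const_iterate {α β : Type} (g : α → α) (l : List β) (st : α) :
    l.foldl (fun s _ => g s) st = g^[l.length] st := by
  induction l generalizing st with
  | nil => rfl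
  | cons x t ih => simpa [Function.iterate_succ_apply] using ih (g st)

theorem pyIdx_of_inRange {L : Nat} {i : Int} (h : PySem.Raise.InRange L i) :
    ∃ k, PySem.List.pyIdx? L i = some k ∧ k < L := by
  obtain ⟨h1, h2⟩ := h
  unfold PySem.List.pyIdx?
  split_ifs <;> simp_all
  omega

theorem pyGet_of_pyIdx {α : Type} (xs : List α) (idx : Int) {k : Nat}
    (h : PySem.List.pyIdx? xs.length idx = some k) :
    PySem.List.pyGet? xs idx = xs[k]? := by
  simp [PySem.List.pyGet?, h]

theorem pyGetD_of_pyIdx {α : Type} (xs : List α) (idx : Int) (d : α) {k : Nat}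
    (h : PySem.List.pyIdx? xs.length idx = some k) (hk : k < xs.length) :
    PySem.List.pyGetD xs idx d = xs[k] := by
  simp [PySem.List.pyGetD, pyGet_of_pyIdx xs idx h, List.getElem?_eq_getElem hk]

theorem pySetD_of_pyIdx {α : Type} (xs : List α) (idx : Int) (v : α) {k : Nat}
    (h : PySem.List.pyIdx? xs.length idx = some k) :
    PySem.List.pySetD xs idx v = xs.set k v := by
  simp [PySem.List.pySetD, PySem.List.pySet?, h]

-- A's first loop after k iterations: the top k crates of stack i are moved, reversed, onto the buffer.
theorem phase1 (o : Int) (L i : Nat) (hiL : i < L)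
    (hidx : PySem.List.pyIdx? L (o - 1) = some i) (k : Nat) :
    ∀ (cargo : List (List String)) (cs : List String),
    cargo.length = L → k ≤ (cargo.getD i []).length →
    (fun (st : List (List String) × List String) =>
      match PySem.List.pyGet? st.1 (o - 1) with
      | none => st
      | some s =>
        match PySem.List.pop? s (-1) with
        | none => st
        | some (c, s') => (PySem.List.pySetD st.1 (o - 1) s', st.2 ++ [c]))^[k] (cargo, cs)
    = (cargo.set i ((cargo.getD i []).take ((cargo.getD i []).length - k)),
       cs ++ ((cargo.getD i []).drop ((cargo.getD i []).length - k)).reverse) := by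
  induction k with
  | zero =>
    intro cargo cs hL hk
    have hi' : i < cargo.length := hL ▸ hiL
    simp [List.getElem?_eq_getElem hi', List.set_getElem_self]
  | succ k ih =>
    intro cargo cs hL hk
    have hi' : i < cargo.length := hL ▸ hiL
    rw [Function.iterate_succ_apply', ih cargo cs hL (by omega)]
    set s : List String := cargo.getD i [] with hs
    set m : Nat := s.length with hm
    have hlenset : (cargo.set i (s.take (m - k))).length = L := by simp [hL]
    have hget : PySem.List.pyGet? (cargo.set i (s.take (m - k))) (o - 1) = some (s.take (m - k)) := by
      rw [pyGet_of_pyIdx _ _ (hlenset ▸ hidx)]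
      rw [List.getElem?_eq_getElem (by simpa [hL] using hiL), List.getElem_set_self]
    have htake : s.take (m - k) = s.take (m - (k + 1)) ++ [s[m - (k + 1)]'(by omega)] := by
      have : m - k = (m - (k + 1)) + 1 := by omega
      rw [this, List.take_succ_eq_append_getElem (by omega)]
    have hpop : PySem.List.pop? (s.take (m - k)) (-1) = some (s[m - (k + 1)]'(by omega), s.take (m - (k + 1))) := by
      rw [htake, PySem.List.pop?_last]
    simp only [hget, hpop]
    rw [pySetD_of_pyIdx _ _ _ (hlenset ▸ hidx), List.set_set]
    have hdrop : s.drop (m - (k + 1)) = s[m - (k + 1)]'(by omega) :: s.drop (m - k) := by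
      have h2 : m - (k + 1) + 1 = m - k := by omega
      rw [List.drop_eq_getElem_cons (by omega), h2]
    rw [hdrop]
    simp

-- A's second loop empties the buffer onto stack j, reversing it back.
theorem phase2 (n : Int) (L j : Nat) (hjL : j < L)
    (hidx : PySem.List.pyIdx? L (n - 1) = some j) :
    ∀ (cs : List String) (cargo : List (List String)), cargo.length = L →
    (fun (st : List (List String) × List String) =>
      match PySem.List.pop? st.2 (-1) with
      | none => st
      | some (c, cs') =>
        (PySem.List.pySetD st.1 (n - 1) (PySem.List.pyGetD st.1 (n - 1) [] ++ [c]), cs'))^[cs.length] (cargo, cs)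
    = (cargo.set j (cargo.getD j [] ++ cs.reverse), []) := by
  intro cs
  induction cs using List.reverseRecOn with
  | nil =>
    intro cargo hL
    have hj' : j < cargo.length := hL ▸ hjL
    simp [List.getElem?_eq_getElem hj', List.set_getElem_self]
  | append_singleton cs' c ih =>
    intro cargo hL
    have hj' : j < cargo.length := hL ▸ hjL
    rw [List.length_append, List.length_singleton, Function.iterate_succ_apply]
    simp only [PySem.List.pop?_last]
    rw [pyGetD_of_pyIdx _ _ _ (hL ▸ hidx) hj', pySetD_of_pyIdx _ _ _ (hL ▸ hidx)]
    rw [ih _ (by simp [hL])]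
    have hgd : ((cargo.set j (cargo[j] ++ [c])).getD j []) = cargo[j] ++ [c] := by
      rw [List.getD_eq_getElem _ _ (by simpa using hj'), List.getElem_set_self]
    rw [hgd, List.set_set, List.getD_eq_getElem _ _ hj']
    simp

-- ===== VERDICT (by name: the statement is the Claim_ definition above) =====
theorem move_multiple_crates_spec : Claim_equal_move_multiple_crates := by
  intro cargo num o n hdom hpre
  simp only [Spec_move_multiple_crates, move_multiple_crates, move_multiple_crates_alt]
  by_cases hnum : num ≤ 0
  · rw [PySem.List.pyRange_one_eq_nil hnum]
    simp [PySem.List.pyRange_one_eq_nil (le_refl 0), if_neg (by omega : ¬ num > 0)]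
  · obtain ⟨hio, hin, hle⟩ := hpre.resolve_left hnum
    obtain ⟨i, hidxo, hiL⟩ := pyIdx_of_inRange hio
    obtain ⟨j, hidxn, hjL⟩ := pyIdx_of_inRange hin
    set k : Nat := num.toNat with hk
    have hknum : (k : Int) = num := Int.toNat_of_nonneg (by omega)
    have hs : PySem.List.pyGetD cargo (o - 1) ([] : List String) = cargo.getD i [] := by
      rw [pyGetD_of_pyIdx _ _ _ hidxo hiL, List.getD_eq_getElem _ _ hiL]
    set s : List String := cargo.getD i [] with hsdef
    set m : Nat := s.length with hm
    have hkm : k ≤ m := by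
      rw [hs] at hle; omega
    have hlen1 : (PySem.List.pyRange 0 num 1).length = k := by
      rw [PySem.List.length_pyRange_one]; omega
    have h1 : List.foldl (fun (st : List (List String) × List String) _ =>
        match PySem.List.pyGet? st.1 (o - 1) with
        | none => st
        | some s =>
          match PySem.List.pop? s (-1) with
          | none => st
          | some (c, s') => (PySem.List.pySetD st.1 (o - 1) s', st.2 ++ [c]))
        (cargo, ([] : List String)) (PySem.List.pyRange 0 num 1)
        = (cargo.set i (s.take (m - k)), [] ++ (s.drop (m - k)).reverse) := by
      rw [foldl_const_iterate, hlen1,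
        phase1 o cargo.length i hiL hidxo k cargo [] rfl (by omega)]
    rw [h1]
    dsimp only [List.nil_append]
    have hlen2 : (PySem.List.pyRange 0 ((((s.drop (m - k)).reverse).length : Nat) : Int) 1).length = ((s.drop (m - k)).reverse).length := by
      rw [PySem.List.length_pyRange_one]; omega
    rw [foldl_const_iterate, hlen2,
      phase2 n cargo.length j hjL hidxn ((s.drop (m - k)).reverse) _ (by simp)]
    rw [if_pos (by omega : num > 0), hs]
    have hneg : -num = -(k : Int) := by omega
    rw [hneg, PySem.List.slice_from_neg_natCast _ k (by omega),
      PySem.List.slice_to_neg_natCast _ k (by omega),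
      pySetD_of_pyIdx _ _ _ hidxo]
    rw [pySetD_of_pyIdx _ _ _ (by simpa using hidxn),
      pyGetD_of_pyIdx _ _ _ (by simpa using hidxn) (by simpa using hjL)]
    rw [List.getD_eq_getElem _ _ (by simpa using hjL)]
    simp [← hm]
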